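-- pv_equiv track=rewrite | github.com/imaltont/aoc-2022 | day-08/day8.py | north_ones
-- ===== SOURCE A (Python) =====
-- def north_ones(trees):
--     visible = [[0 for x in range(len(trees))] for y in range(len(trees))]
--     for i in range(0, len(trees)):
--         prev_max = -1
--         for j in range(0, len(trees)):
--             if trees[j][i] > prev_max:
--                 prev_max = trees[j][i]
--                 visible[j][i] = 1
--     return visible
-- ===== SOURCE B (Python) =====
-- def north_ones(trees):
--     n = len(trees)
--     # Pass 1: per-row prefix-maximum arrays; maxes[j][i] = max height strictly above cell (j, i), -1 for the top row.
--     maxes = []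
--     cur = [-1] * n
--     for j in range(n):
--         row = trees[j]
--         maxes.append(cur)
--         cur = [m if m >= row[i] else row[i] for i, m in enumerate(cur)]
--     # Pass 2: a tree is visible from the north iff it is strictly taller than everything above it.
--     return [[1 if trees[j][i] > maxes[j][i] else 0 for i in range(n)] for j in range(n)]
-- ===== Notes on version B (the rewrite author's own statement) =====
-- stated objective: alternative
-- what changed: Replaces A's column-by-column in-place marking with a threaded running maximum by a row-wise two-phase computation: one pass builds per-row prefix-maximum arrays (max height strictly above each cell), then the grid is rebuilt by comparing each cell against that array.
import Mathlib
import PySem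

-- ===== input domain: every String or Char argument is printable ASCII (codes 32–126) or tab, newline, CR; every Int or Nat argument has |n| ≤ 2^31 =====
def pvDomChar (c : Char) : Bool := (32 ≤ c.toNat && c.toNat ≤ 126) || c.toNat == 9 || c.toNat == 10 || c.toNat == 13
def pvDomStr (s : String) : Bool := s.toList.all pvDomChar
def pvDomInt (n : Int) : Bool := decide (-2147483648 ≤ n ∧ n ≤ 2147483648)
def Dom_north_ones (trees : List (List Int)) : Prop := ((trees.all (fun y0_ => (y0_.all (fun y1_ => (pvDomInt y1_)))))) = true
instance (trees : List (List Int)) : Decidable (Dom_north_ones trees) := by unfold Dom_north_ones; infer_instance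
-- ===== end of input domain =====

-- B replaces A's column-by-column in-place marking with a row-wise two-phase pass:
-- build per-row prefix-maximum arrays, then rebuild the 0/1 grid by comparing each
-- cell against the maximum strictly above it (same O(n^2) cost, different decomposition).


-- ===== PORT A =====
-- trees[j][i] is ported with getD; under Pre_north_ones (every row at least len(trees)
-- long) every index Python touches is in range, so this is exact there.
def north_ones (trees : List (List Int)) : List (List Int) :=
  let n := trees.length
  let visible : List (List Int) := (List.range n).map (fun _ => (List.range n).map (fun _ => (0 : Int)))
  (List.range n).foldl (fun visible i =>
    ((List.range n).foldl (fun (st : List (List Int) × Int) j =>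
        let t := (trees.getD j []).getD i 0
        if t > st.2 then (st.1.modify j (fun row => row.set i 1), t) else st)
      (visible, (-1 : Int))).1) visible

-- ===== PORT B =====
def north_ones_alt (trees : List (List Int)) : List (List Int) :=
  let n := trees.length
  let p := (List.range n).foldl (fun (st : List (List Int) × List Int) j =>
      let row := trees.getD j []
      (st.1 ++ [st.2], st.2.mapIdx (fun i m => if m ≥ row.getD i 0 then m else row.getD i 0)))
    ([], List.replicate n (-1 : Int))
  let maxes := p.1
  (List.range n).map (fun j => (List.range n).map (fun i =>
      if (trees.getD j []).getD i 0 > (maxes.getD j []).getD i 0 then (1 : Int) else (0 : Int)))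

-- ===== PRECONDITION & SPEC =====
-- Pre_ excludes exactly the inputs where Python A raises IndexError (a row shorter
-- than the number of rows, read by trees[j][i] with i in range(len(trees))).
def Pre_north_ones (trees : List (List Int)) : Prop :=
  ∀ row ∈ trees, trees.length ≤ row.length
instance (trees : List (List Int)) : Decidable (Pre_north_ones trees) := by
  unfold Pre_north_ones; infer_instance

def pvWitness_north_ones : List (List Int) := [[3, 1], [2, 4]]

def Spec_north_ones (trees : List (List Int)) (out : List (List Int)) : Prop := out = north_ones_alt trees
instance (trees : List (List Int)) (out : List (List Int)) : Decidable (Spec_north_ones trees out) := by unfold Spec_north_ones; infer_instance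

-- ===== CLAIM (what is proved, stated in full; the proofs are below) =====
def Claim_equal_north_ones : Prop := ∀ (trees : List (List Int)), Dom_north_ones trees → Pre_north_ones trees → Spec_north_ones trees (north_ones trees)

-- ===== LEMMAS AND PROOFS =====

-- height of tree (row j, column i), with the ports' getD defaults
def gH (trees : List (List Int)) (j i : Nat) : Int := (trees.getD j []).getD i 0

-- running maximum of column i over rows 0..j-1, seeded at -1 (A's prev_max)
def pmH (trees : List (List Int)) (i : Nat) : Nat → Int
  | 0 => -1
  | j + 1 => if gH trees j i > pmH trees i j then gH trees j i else pmH trees i j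

-- the common entry value: 1 iff strictly taller than everything above
def eH (trees : List (List Int)) (j i : Nat) : Int :=
  if gH trees j i > pmH trees i j then 1 else 0

-- A's visible matrix after the first m columns have been processed
def VH (trees : List (List Int)) (m : Nat) : List (List Int) :=
  (List.range trees.length).map (fun j => (List.range trees.length).map
    (fun i => if i < m then eH trees j i else 0))

-- A's visible matrix during column m, after the first k rows of the inner loop
def WH (trees : List (List Int)) (m k : Nat) : List (List Int) :=
  (List.range trees.length).map (fun j => (List.range trees.length).map
    (fun i => if i < m then eH trees j i else if i = m ∧ j < k then eH trees j m else 0))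

lemma WH_zero (trees : List (List Int)) (m : Nat) : WH trees m 0 = VH trees m := by
  unfold WH VH
  refine List.map_congr_left (fun j _ => List.map_congr_left (fun i _ => ?_))
  simp

lemma innerA (trees : List (List Int)) (m : Nat) : ∀ k,
    (List.range k).foldl (fun (st : List (List Int) × Int) j =>
        let t := (trees.getD j []).getD m 0
        if t > st.2 then (st.1.modify j (fun row => row.set m 1), t) else st)
      (VH trees m, (-1 : Int))
    = (WH trees m k, pmH trees m k) := by
  intro k
  induction k with
  | zero => simp [pmH, WH_zero]
  | succ k ih =>
    rw [List.range_succ, List.foldl_append, ih]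
    simp only [List.foldl_cons, List.foldl_nil]
    have hg : (trees.getD k []).getD m 0 = gH trees k m := rfl
    by_cases h : gH trees k m > pmH trees m k
    · rw [hg, if_pos h]
      refine Prod.ext ?_ ?_
      · show (WH trees m k).modify k (fun row => row.set m 1) = WH trees m (k + 1)
        apply List.ext_getElem?
        intro j
        unfold WH
        rw [List.getElem?_modify]
        by_cases hj : j < trees.length
        · simp only [List.getElem?_map, List.getElem?_range, hj, Option.map_some,
            Option.map_eq_map]
          by_cases hjk : k = j
          · subst hjk
            simp only [if_true]
            congr 1
            apply List.ext_getElem?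
            intro i
            rw [List.getElem?_set]
            by_cases hi : i < trees.length
            · simp only [List.getElem?_map, List.getElem?_range hi, List.length_map,
                List.length_range, Option.map_some]
              by_cases him : m = i
              · subst him
                have : ¬ m < m := by omega
                simp only [hi, if_pos]
                simp only [this, if_false, true_and]
                have hkk : k < k + 1 := by omega
                simp [hkk, eH, h]
              · simp only [him, if_false]
                have him' : ¬ i = m := fun hh => him hh.symm
                simp [him']
            · have hge : trees.length ≤ i := by omega
              by_cases hmi : m = i
              · subst hmi
                simp [List.length_map, List.length_range, show ¬ m < trees.length by omega]
              · simp [hmi, List.length_map, List.length_range, hge]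
          · simp only [hjk, if_false]
            congr 1
            congr 1
            funext i
            have : (i = m ∧ j < k) ↔ (i = m ∧ j < k + 1) := by omega
            simp only [this]
        · have : trees.length ≤ j := by omega
          simp [List.length_range, this]
      · show gH trees k m = pmH trees m (k + 1)
        simp [pmH, h]
    · rw [hg, if_neg h]
      refine Prod.ext ?_ ?_
      · show WH trees m k = WH trees m (k + 1)
        unfold WH
        refine List.map_congr_left (fun j hj => ?_)
        congr 1
        funext i
        rw [List.mem_range] at hj
        by_cases h1 : i < m
        · simp [h1]
        · by_cases h2 : i = m
          · subst h2
            by_cases hjk : j = k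
            · subst hjk
              have hlt : ¬ j < j := by omega
              simp [eH, h]
            · have : (j < k) ↔ (j < k + 1) := by omega
              simp [this]
          · simp [h1, h2]
      · show pmH trees m k = pmH trees m (k + 1)
        simp [pmH, h]

lemma WH_top (trees : List (List Int)) (m : Nat) : WH trees m trees.length = VH trees (m + 1) := by
  unfold WH VH
  refine List.map_congr_left (fun j hj => List.map_congr_left (fun i hi => ?_))
  rw [List.mem_range] at hj hi
  by_cases h1 : i < m
  · simp [h1, show i < m + 1 by omega]
  · by_cases h2 : i = m
    · subst h2
      simp [hj, show i < i + 1 by omega]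
    · simp [h1, h2, show ¬ i < m + 1 by omega]

lemma outerA (trees : List (List Int)) : ∀ m,
    (List.range m).foldl (fun visible i =>
      ((List.range trees.length).foldl (fun (st : List (List Int) × Int) j =>
          let t := (trees.getD j []).getD i 0
          if t > st.2 then (st.1.modify j (fun row => row.set i 1), t) else st)
        (visible, (-1 : Int))).1) (VH trees 0)
    = VH trees m := by
  intro m
  induction m with
  | zero => simp
  | succ m ih =>
    rw [List.range_succ, List.foldl_append, ih]
    simp only [List.foldl_cons, List.foldl_nil]
    rw [innerA trees m trees.length, WH_top]

lemma north_ones_eq_VH (trees : List (List Int)) :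
    north_ones trees = VH trees trees.length := by
  unfold north_ones
  have h0 : (List.range trees.length).map
      (fun _ => (List.range trees.length).map (fun _ => (0 : Int))) = VH trees 0 := by
    unfold VH
    refine List.map_congr_left (fun j _ => List.map_congr_left (fun i _ => ?_))
    simp
  simp only [h0]
  exact outerA trees trees.length

-- B-side: the per-row prefix-maximum array after m steps
def curH (trees : List (List Int)) (j : Nat) : List Int :=
  (List.range trees.length).map (fun i => pmH trees i j)

lemma foldB (trees : List (List Int)) : ∀ m,
    (List.range m).foldl (fun (st : List (List Int) × List Int) j =>
        let row := trees.getD j []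
        (st.1 ++ [st.2], st.2.mapIdx (fun i mx => if mx ≥ row.getD i 0 then mx else row.getD i 0)))
      ([], List.replicate trees.length (-1 : Int))
    = ((List.range m).map (curH trees), curH trees m) := by
  intro m
  induction m with
  | zero =>
    simp only [List.range_zero, List.foldl_nil, List.map_nil]
    refine Prod.ext rfl ?_
    show List.replicate trees.length (-1 : Int) = curH trees 0
    unfold curH
    rw [show (fun i => pmH trees i 0) = Function.const Nat (-1 : Int) from funext (fun i => rfl)]
    simp [List.map_const]
  | succ m ih =>
    rw [List.range_succ, List.foldl_append, ih]
    simp only [List.foldl_cons, List.foldl_nil]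
    refine Prod.ext ?_ ?_
    · show (List.range m).map (curH trees) ++ [curH trees m]
        = (List.range m ++ [m]).map (curH trees)
      simp
    · show (curH trees m).mapIdx
        (fun i mx => if mx ≥ (trees.getD m []).getD i 0 then mx else (trees.getD m []).getD i 0)
        = curH trees (m + 1)
      apply List.ext_getElem?
      intro i
      unfold curH
      rw [List.getElem?_mapIdx]
      by_cases hi : i < trees.length
      · simp only [List.getElem?_map, List.getElem?_range hi, Option.map_some]
        congr 1
        show (if pmH trees i m ≥ gH trees m i then pmH trees i m else gH trees m i)
          = pmH trees i (m + 1)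
        have hpm : pmH trees i (m + 1)
            = if gH trees m i > pmH trees i m then gH trees m i else pmH trees i m := rfl
        rw [hpm]
        by_cases h : gH trees m i > pmH trees i m
        · rw [if_neg (by omega), if_pos h]
        · rw [if_pos (by omega), if_neg h]
      · simp [List.length_map, List.length_range, hi]

lemma north_ones_alt_eq_VH (trees : List (List Int)) :
    north_ones_alt trees = VH trees trees.length := by
  unfold north_ones_alt
  simp only [foldB trees trees.length]
  unfold VH
  refine List.map_congr_left (fun j hj => List.map_congr_left (fun i hi => ?_))
  rw [List.mem_range] at hj hi
  have hmax : (((List.range trees.length).map (curH trees)).getD j []).getD i 0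
      = pmH trees i j := by
    simp only [List.getD_eq_getElem?_getD]
    rw [List.getElem?_map, List.getElem?_range hj]
    simp only [Option.map_some, Option.getD_some]
    unfold curH
    rw [List.getElem?_map, List.getElem?_range hi]
    simp
  rw [hmax]
  simp [eH, gH, hi]

-- ===== VERDICT (by name: the statement is the Claim_ definition above) =====
theorem north_ones_spec : Claim_equal_north_ones := by
  intro trees _ _
  show north_ones trees = north_ones_alt trees
  rw [north_ones_eq_VH, north_ones_alt_eq_VH]
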